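-- pv_equiv track=rewrite | github.com/sueszli/vector-database-benchmark | dataset/python-mutated/gen_external.py | filter_cpp_output
-- ===== SOURCE A (Python) =====
-- def filter_cpp_output(cpp_raw_output):
--     if False:
--         return 10
--     ' prepare cpp-output for parsing '
--     cpp_output = filter(lambda y: len(y) > 1, cpp_raw_output)
--     cpp_output = list(filter(lambda y: not y.startswith('#'), cpp_output))
--     i = 1
--     while 1:
--         if i >= len(cpp_output):
--             break
--         if '{' in cpp_output[i - 1] and '}' not in cpp_output[i - 1] or ';' not in cpp_output[i - 1]:
--             cpp_output[i] = cpp_output[i - 1] + ' ' + cpp_output[i]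
--             cpp_output.pop(i - 1)
--         elif '}' in cpp_output[i]:
--             cpp_output[i] = cpp_output[i - 1] + ' ' + cpp_output[i]
--             cpp_output.pop(i - 1)
--         else:
--             i += 1
--     tmp = []
--     for l in cpp_output:
--         tmp += [l.replace(' *', ' * ')]
--     cpp_output = tmp
--     return cpp_output
-- ===== SOURCE B (Python) =====
-- def filter_cpp_output(cpp_raw_output):
--     """ prepare cpp-output for parsing """
--     lines = [y for y in cpp_raw_output if len(y) > 1 and not y.startswith('#')]
--     if not lines:
--         return []
--     out = []
--     prev = lines[0]
--     for cur in lines[1:]: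
--         if ('{' in prev and '}' not in prev) or ';' not in prev or '}' in cur:
--             prev = prev + ' ' + cur
--         else:
--             out.append(prev)
--             prev = cur
--     out.append(prev)
--     return [l.replace(' *', ' * ') for l in out]
-- ===== Notes on version B (the rewrite author's own statement) =====
-- stated objective: faster
-- what changed: Replaces A's quadratic while-loop that repeatedly sets cpp_output[i] and pops index i-1 from the list with a single left-to-right pass keeping one merged 'prev' accumulator and appending finished lines to the output.
import Mathlib
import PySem

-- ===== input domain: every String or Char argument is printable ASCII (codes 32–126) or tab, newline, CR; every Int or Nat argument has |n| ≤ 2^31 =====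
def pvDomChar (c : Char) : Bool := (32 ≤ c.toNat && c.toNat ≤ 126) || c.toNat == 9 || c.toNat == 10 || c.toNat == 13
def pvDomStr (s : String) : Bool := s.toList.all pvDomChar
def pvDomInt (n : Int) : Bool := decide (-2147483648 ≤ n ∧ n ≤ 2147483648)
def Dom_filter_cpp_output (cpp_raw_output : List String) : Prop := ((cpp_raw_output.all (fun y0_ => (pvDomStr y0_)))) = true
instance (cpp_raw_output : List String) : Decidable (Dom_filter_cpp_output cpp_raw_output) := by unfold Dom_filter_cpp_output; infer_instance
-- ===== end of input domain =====

-- B replaces A's quadratic index-and-pop merging loop by a single left-to-right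
-- pass keeping one merged 'prev' accumulator and appending to the output (objective: faster, asymptotic).

-- ===== PORT A =====
-- A's while-loop: state is the (mutated) list and the index i; merging sets
-- cpp_output[i] and pops index i-1 (list shrinks), otherwise i advances.
def filter_cpp_output_loopA (l : List String) (i : Nat) : List String :=
  if h : i < l.length then
    let prev := l.getD (i - 1) ""
    let cur := l.getD i ""
    if (PySem.Str.isIn "{" prev && !PySem.Str.isIn "}" prev) || !PySem.Str.isIn ";" prev then
      filter_cpp_output_loopA ((l.set i (prev ++ " " ++ cur)).eraseIdx (i - 1)) i
    else if PySem.Str.isIn "}" cur then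
      filter_cpp_output_loopA ((l.set i (prev ++ " " ++ cur)).eraseIdx (i - 1)) i
    else
      filter_cpp_output_loopA l (i + 1)
  else l
termination_by 2 * l.length - i
decreasing_by
  · simp only [List.length_eraseIdx, List.length_set]
    split <;> omega
  · simp only [List.length_eraseIdx, List.length_set]
    split <;> omega
  · omega

def filter_cpp_output (cpp_raw_output : List String) : List String :=
  let cpp_output := (cpp_raw_output.filter (fun y => PySem.Str.len y > 1)).filter
      (fun y => !PySem.Str.startswith y "#")
  let cpp_output := filter_cpp_output_loopA cpp_output 1
  -- tmp = []; for l in cpp_output: tmp += [l.replace(' *', ' * ')]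
  cpp_output.foldl (fun tmp l => tmp ++ [PySem.Str.replace l " *" " * "]) []

-- ===== PORT B =====
-- B's single pass: 'out' is the finished output, 'prev' the line being merged.
def filter_cpp_output_loopB (out : List String) (prev : String) : List String → List String
  | [] => out ++ [prev]
  | cur :: rest =>
    if ((PySem.Str.isIn "{" prev && !PySem.Str.isIn "}" prev) || !PySem.Str.isIn ";" prev)
        || PySem.Str.isIn "}" cur then
      filter_cpp_output_loopB out (prev ++ " " ++ cur) rest
    else
      filter_cpp_output_loopB (out ++ [prev]) cur rest

def filter_cpp_output_alt (cpp_raw_output : List String) : List String :=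
  let lines := cpp_raw_output.filter
      (fun y => PySem.Str.len y > 1 && !PySem.Str.startswith y "#")
  match lines with
  | [] => []
  | h :: t => (filter_cpp_output_loopB [] h t).map (fun l => PySem.Str.replace l " *" " * ")

-- ===== PRECONDITION & SPEC =====
def Spec_filter_cpp_output (cpp_raw_output : List String) (out : List String) : Prop := out = filter_cpp_output_alt cpp_raw_output
instance (cpp_raw_output : List String) (out : List String) : Decidable (Spec_filter_cpp_output cpp_raw_output out) := by unfold Spec_filter_cpp_output; infer_instance

-- ===== CLAIM (what is proved, stated in full; the proofs are below) =====
def Claim_equal_filter_cpp_output : Prop := ∀ (cpp_raw_output : List String), Dom_filter_cpp_output cpp_raw_output → Spec_filter_cpp_output cpp_raw_output (filter_cpp_output cpp_raw_output)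

-- ===== LEMMAS AND PROOFS =====

theorem pv_getD_append_cons (t : List String) (x : String) (z : List String) (d : String) :
    (t ++ x :: z).getD t.length d = x := by
  induction t with
  | nil => rfl
  | cons a t ih => simpa using ih

theorem pv_set_append_cons (t : List String) (x v : String) (z : List String) :
    (t ++ x :: z).set t.length v = t ++ v :: z := by
  induction t with
  | nil => rfl
  | cons a t ih => simpa using ih

theorem pv_eraseIdx_append_cons (t : List String) (x : String) (z : List String) :
    (t ++ x :: z).eraseIdx t.length = t ++ z := by
  induction t with
  | nil => rfl
  | cons a t ih => simpa using ih

theorem loopB_out (out : List String) (prev : String) (rest : List String) :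
    filter_cpp_output_loopB out prev rest = out ++ filter_cpp_output_loopB [] prev rest := by
  induction rest generalizing out prev with
  | nil => simp [filter_cpp_output_loopB]
  | cons cur r ih =>
    simp only [filter_cpp_output_loopB]
    split
    · rw [ih out, ih []]
    · rw [ih (out ++ [prev]), ih ([] ++ [prev])]
      simp

-- Core correspondence: A's loop at state (t ++ prev :: rest, |t|+1) — everything
-- before index |t| is final, prev is at index |t| — equals B's single pass.
theorem loopA_eq_loopB (t : List String) (prev : String) (rest : List String) :
    filter_cpp_output_loopA (t ++ prev :: rest) (t.length + 1)
      = t ++ filter_cpp_output_loopB [] prev rest := by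
  cases rest with
  | nil =>
    rw [filter_cpp_output_loopA]
    simp [filter_cpp_output_loopB]
  | cons cur r =>
    rw [filter_cpp_output_loopA]
    have hlen : t.length + 1 < (t ++ prev :: cur :: r).length := by simp
    have hprev : (t ++ prev :: cur :: r).getD (t.length + 1 - 1) "" = prev := by
      simpa using pv_getD_append_cons t prev (cur :: r) ""
    have hcur : (t ++ prev :: cur :: r).getD (t.length + 1) "" = cur := by
      have := pv_getD_append_cons (t ++ [prev]) cur r ""
      simpa using this
    have hset : ((t ++ prev :: cur :: r).set (t.length + 1) (prev ++ " " ++ cur)).eraseIdx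
        (t.length + 1 - 1) = t ++ (prev ++ " " ++ cur) :: r := by
      have h1 : (t ++ prev :: cur :: r).set (t.length + 1) (prev ++ " " ++ cur)
          = t ++ prev :: (prev ++ " " ++ cur) :: r := by
        have := pv_set_append_cons (t ++ [prev]) cur (prev ++ " " ++ cur) r
        simpa using this
      rw [h1]
      simpa using pv_eraseIdx_append_cons t prev ((prev ++ " " ++ cur) :: r)
    simp only [hlen, dif_pos, hprev, hcur]
    by_cases h1 : ((PySem.Str.isIn "{" prev && !PySem.Str.isIn "}" prev)
        || !PySem.Str.isIn ";" prev) = true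
    · rw [if_pos h1, hset, loopA_eq_loopB t (prev ++ " " ++ cur) r]
      simp only [filter_cpp_output_loopB]
      rw [if_pos (by simp only [h1, Bool.true_or])]
    · rw [if_neg h1]
      by_cases h2 : PySem.Str.isIn "}" cur = true
      · rw [if_pos h2, hset, loopA_eq_loopB t (prev ++ " " ++ cur) r]
        simp only [filter_cpp_output_loopB]
        rw [if_pos (by simp only [h2, Bool.or_true])]
      · rw [if_neg h2]
        have hsplit : (t ++ prev :: cur :: r) = (t ++ [prev]) ++ cur :: r := by simp
        rw [hsplit]
        have harr : t.length + 1 + 1 = (t ++ [prev]).length + 1 := by simp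
        rw [harr, loopA_eq_loopB (t ++ [prev]) cur r]
        simp only [filter_cpp_output_loopB]
        rw [if_neg (by
            simp only [eq_false_of_ne_true h1, eq_false_of_ne_true h2, Bool.or_false]
            exact Bool.false_ne_true),
          loopB_out ([] ++ [prev]) cur r]
        simp
termination_by t.length + 2 * rest.length
decreasing_by
  all_goals (simp only [List.length_append, List.length_cons, List.length_nil]; omega)

-- ===== VERDICT (by name: the statement is the Claim_ definition above) =====
theorem filter_cpp_output_spec : Claim_equal_filter_cpp_output := by
  intro xs _
  unfold Spec_filter_cpp_output filter_cpp_output filter_cpp_output_alt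
  have hf : (xs.filter (fun y => PySem.Str.len y > 1)).filter
        (fun y => !PySem.Str.startswith y "#")
      = xs.filter (fun y => PySem.Str.len y > 1 && !PySem.Str.startswith y "#") := by
    rw [List.filter_filter]
    exact List.filter_congr (fun a _ => by rw [Bool.and_comm])
  rw [PySem.List.foldl_append_singleton_eq_map, hf]
  generalize xs.filter (fun y => PySem.Str.len y > 1 && !PySem.Str.startswith y "#") = l
  cases l with
  | nil =>
    rw [filter_cpp_output_loopA]
    simp
  | cons hd tl =>
    have h0 := loopA_eq_loopB [] hd tl
    simpa using congrArg (List.map (fun l => PySem.Str.replace l " *" " * ")) h0
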